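-- pv_equiv track=rewrite | github.com/nsaikiran/MyPrograms | Python/interview-prep/corner-elemenets.py | two_pointer_optimzed
-- ===== SOURCE A (Python) =====
-- def two_pointer_optimzed(data, no_elements_to_pick):
--     # Assume no of element to pick is less than half, otherwise they will overlap, any problem? or in this case can we optimize/
--     if not no_elements_to_pick < len(data):
--         return -1
--
--     # pick all left elements.
--     curr_max_sum = sum_seen_so_far = sum(data[:no_elements_to_pick])
--
--     right_element_to_pick =  -1
--
--     curr_left_index = no_elements_to_pick - 1
--
--     while curr_left_index > 0:
--         sum_seen_so_far = sum_seen_so_far - data[curr_left_index] + data[right_element_to_pick]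
--         curr_max_sum = max(sum_seen_so_far, curr_max_sum)
--         curr_left_index -= 1
--         right_element_to_pick -= 1
--     return curr_max_sum
-- ===== SOURCE B (Python) =====
-- def two_pointer_optimzed(data, no_elements_to_pick):
--     k = no_elements_to_pick
--     if not k < len(data):
--         return -1
--     # prefix sums of the first min(k, len) elements and suffix sums of the last k-1 elements
--     pre = [0]
--     for x in data[:k]:
--         pre.append(pre[-1] + x)
--     suf = [0]
--     for x in reversed(data[len(data) - (k - 1):]):
--         suf.append(suf[-1] + x)
--     ans = pre[-1]
--     for j in range(k - 1, 0, -1):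
--         ans = max(ans, pre[j] + suf[k - j])
--     return ans
-- ===== Notes on version B (the rewrite author's own statement) =====
-- stated objective: alternative
-- what changed: Replaces A's in-place two-pointer sliding-window mutation with precomputed prefix-sum and suffix-sum tables and a max over split points j (prefix of j + suffix of k-j, j from k down to 1, matching A's configuration set).
import Mathlib
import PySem

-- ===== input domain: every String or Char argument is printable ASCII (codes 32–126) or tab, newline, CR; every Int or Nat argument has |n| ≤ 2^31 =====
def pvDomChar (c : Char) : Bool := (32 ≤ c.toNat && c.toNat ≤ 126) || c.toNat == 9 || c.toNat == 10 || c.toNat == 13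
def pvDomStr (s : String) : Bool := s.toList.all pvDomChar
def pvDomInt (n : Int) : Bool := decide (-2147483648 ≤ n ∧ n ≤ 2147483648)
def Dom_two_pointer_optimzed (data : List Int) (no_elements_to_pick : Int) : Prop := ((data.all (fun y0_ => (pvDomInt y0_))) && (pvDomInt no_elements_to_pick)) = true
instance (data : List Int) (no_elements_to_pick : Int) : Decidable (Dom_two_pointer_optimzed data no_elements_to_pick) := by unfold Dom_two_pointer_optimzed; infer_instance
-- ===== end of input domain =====

-- B replaces A's in-place sliding-window update (two moving pointers mutating one running sum)
-- by prefix/suffix sum tables and a max over split points; same O(n) cost, different decomposition.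

-- ===== PORT A =====
-- The while loop on curr_left_index (k-1, k-2, …, 1) is ported as a foldl over pyRange (k-1) 0 (-1);
-- state = (sum_seen_so_far, curr_max_sum, right_element_to_pick). Whenever the loop body runs,
-- 1 ≤ i ≤ k-1 < len data and -(k-1) ≤ r ≤ -1, so both indices are in range and pyGetD's
-- default 0 is never used (Python raises nowhere; A is total).
def two_pointer_optimzed (data : List Int) (no_elements_to_pick : Int) : Int :=
  if ¬ no_elements_to_pick < (data.length : Int) then -1
  else
    let s0 := (PySem.List.slice data none (some no_elements_to_pick)).sum
    let st := (PySem.List.pyRange (no_elements_to_pick - 1) 0 (-1)).foldl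
      (fun (p : Int × Int × Int) i =>
        let s := p.1 - PySem.List.pyGetD data i 0 + PySem.List.pyGetD data p.2.2 0
        (s, max s p.2.1, p.2.2 - 1)) (s0, s0, -1)
    st.2.1

-- ===== PORT B =====
-- pre.append(pre[-1] + x) / suf.append(suf[-1] + x) ported as foldls appending to the list;
-- all pyGetD indices into pre and suf are in range when used, so the default 0 is never used.
def two_pointer_optimzed_alt (data : List Int) (no_elements_to_pick : Int) : Int :=
  if ¬ no_elements_to_pick < (data.length : Int) then -1
  else
    let pre := (PySem.List.slice data none (some no_elements_to_pick)).foldl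
      (fun l x => l ++ [PySem.List.pyGetD l (-1) 0 + x]) [(0 : Int)]
    let suf := (PySem.List.slice data (some ((data.length : Int) - (no_elements_to_pick - 1))) none).reverse.foldl
      (fun l x => l ++ [PySem.List.pyGetD l (-1) 0 + x]) [(0 : Int)]
    (PySem.List.pyRange (no_elements_to_pick - 1) 0 (-1)).foldl
      (fun a j => max a (PySem.List.pyGetD pre j 0 + PySem.List.pyGetD suf (no_elements_to_pick - j) 0))
      (PySem.List.pyGetD pre (-1) 0)

-- ===== PRECONDITION & SPEC =====
def Spec_two_pointer_optimzed (data : List Int) (no_elements_to_pick : Int) (out : Int) : Prop := out = two_pointer_optimzed_alt data no_elements_to_pick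
instance (data : List Int) (no_elements_to_pick : Int) (out : Int) : Decidable (Spec_two_pointer_optimzed data no_elements_to_pick out) := by unfold Spec_two_pointer_optimzed; infer_instance

-- ===== CLAIM (what is proved, stated in full; the proofs are below) =====
def Claim_equal_two_pointer_optimzed : Prop := ∀ (data : List Int) (no_elements_to_pick : Int), Dom_two_pointer_optimzed data no_elements_to_pick → Spec_two_pointer_optimzed data no_elements_to_pick (two_pointer_optimzed data no_elements_to_pick)

-- ===== LEMMAS AND PROOFS =====

-- B's accumulation loop (pre[-1] + x appended), named for the proofs
def pvPsums (xs : List Int) : List Int :=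
  xs.foldl (fun l x => l ++ [PySem.List.pyGetD l (-1) 0 + x]) [0]

lemma pvPsums_eq (xs : List Int) :
    pvPsums xs = (List.range (xs.length + 1)).map (fun j => (xs.take j).sum) := by
  induction xs using List.reverseRecOn with
  | nil => simp [pvPsums]
  | append_singleton xs y ih =>
    unfold pvPsums at *
    rw [List.foldl_append, ih, List.foldl_cons, List.foldl_nil]
    have h2 : (xs ++ [y]).length + 1 = (xs.length + 1) + 1 := by simp
    rw [h2, List.range_succ (n := xs.length + 1), List.map_append]
    congr 1
    · apply List.map_congr_left
      intro j hj
      rw [List.mem_range] at hj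
      rw [List.take_append_of_le_length (by omega)]
    · rw [List.range_succ, List.map_append, List.map_singleton,
        PySem.List.pyGetD_neg_one_append_singleton]
      simp

lemma pvPsums_last (xs : List Int) :
    PySem.List.pyGetD (pvPsums xs) (-1) 0 = xs.sum := by
  rw [pvPsums_eq, List.range_succ, List.map_append, List.map_singleton,
    PySem.List.pyGetD_neg_one_append_singleton, List.take_length]

-- value of the configuration picking j corner elements from the left and kn - j from the right
def pvC (data : List Int) (kn j : Nat) : Int :=
  (data.take j).sum + (data.drop (data.length - (kn - j))).sum

-- one step of A's sliding window moves configuration j+1 to configuration j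
lemma pvC_step (data : List Int) (kn j : Nat) (hj1 : 1 ≤ j) (hjk : j < kn)
    (hkn : kn < data.length) :
    pvC data kn (j + 1) - PySem.List.pyGetD data (j : Int) 0
      + PySem.List.pyGetD data ((j : Int) - (kn : Int)) 0 = pvC data kn j := by
  have hneg : ((j : Int) - (kn : Int)) = -((kn - j : Nat) : Int) := by
    push_cast [Nat.cast_sub hjk.le]; ring
  rw [hneg, PySem.List.pyGetD_neg_natCast data (kn - j) 0 (by omega) (by omega),
    PySem.List.pyGetD_natCast]
  unfold pvC
  have hlt : data.length - (kn - j) < data.length := by omega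
  rw [List.sum_take_succ data j (by omega), List.drop_eq_getElem_cons hlt]
  have hidx : data.length - (kn - j) + 1 = data.length - (kn - (j + 1)) := by omega
  rw [List.getD_eq_getElem data 0 (by omega : j < data.length), hidx]
  simp [List.sum_cons]
  ring

-- A's while loop computes the running max of pvC over the indices it visits
lemma pvLoopA (data : List Int) (kn : Nat) (hkn : kn < data.length) :
    ∀ (i : Nat) (m : Int), i < kn →
      ((PySem.List.pyRange (i : Int) 0 (-1)).foldl
        (fun (p : Int × Int × Int) t =>
          let s := p.1 - PySem.List.pyGetD data t 0 + PySem.List.pyGetD data p.2.2 0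
          (s, max s p.2.1, p.2.2 - 1)) (pvC data kn (i + 1), m, (i : Int) - (kn : Int))).2.1
      = (PySem.List.pyRange (i : Int) 0 (-1)).foldl
          (fun a j => max a (pvC data kn j.toNat)) m := by
  intro i
  induction i with
  | zero => intro m _; rw [PySem.List.pyRange_neg_one_eq_nil (by omega)]; rfl
  | succ i ih =>
    intro m hi
    rw [PySem.List.pyRange_neg_one_cons (by omega : (0:Int) < ((i+1 : Nat) : Int))]
    rw [List.foldl_cons, List.foldl_cons]
    have hstep : pvC data kn (i + 1 + 1) - PySem.List.pyGetD data ((i+1 : Nat) : Int) 0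
        + PySem.List.pyGetD data (((i+1 : Nat) : Int) - (kn : Int)) 0 = pvC data kn (i+1) :=
      pvC_step data kn (i+1) (by omega) hi hkn
    simp only []
    rw [hstep]
    have hc : ((i+1 : Nat) : Int) - 1 = (i : Nat) := by push_cast; ring
    have hc2 : ((i+1 : Nat) : Int) - (kn : Int) - 1 = ((i : Nat) : Int) - (kn : Int) := by
      push_cast; ring
    rw [hc, hc2, ih (max (pvC data kn (i+1)) m) (by omega)]
    congr 1
    rw [max_comm]
    norm_num

-- B's table lookups at split point j give the same configuration value pvC
lemma pvB_elem (data : List Int) (kn : Nat) (hkn1 : 1 ≤ kn) (hkn : kn < data.length)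
    (j : Int) (hj0 : 0 < j) (hj : j ≤ (kn : Int) - 1) :
    PySem.List.pyGetD (pvPsums (data.take kn)) j 0
      + PySem.List.pyGetD (pvPsums (data.drop (data.length - kn + 1)).reverse) ((kn : Int) - j) 0
    = pvC data kn j.toNat := by
  obtain ⟨jt, rfl⟩ : ∃ jt : Nat, j = (jt : Int) := ⟨j.toNat, (Int.toNat_of_nonneg hj0.le).symm⟩
  have hjt1 : 1 ≤ jt := by omega
  have hjtk : jt ≤ kn - 1 := by omega
  have hkj : (kn : Int) - (jt : Int) = ((kn - jt : Nat) : Int) := by omega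
  rw [hkj, PySem.List.pyGetD_natCast, PySem.List.pyGetD_natCast, pvPsums_eq, pvPsums_eq,
    Int.toNat_natCast]
  have hlen1 : (data.take kn).length = kn := by rw [List.length_take]; omega
  have hlen2 : (data.drop (data.length - kn + 1)).reverse.length = kn - 1 := by
    rw [List.length_reverse, List.length_drop]; omega
  rw [hlen1, hlen2, PySem.List.getD_map_range _ _ _ _ (by omega),
    PySem.List.getD_map_range _ _ _ _ (by omega)]
  rw [List.take_take, min_eq_left (by omega), List.take_reverse, List.sum_reverse,
    List.length_drop, List.drop_drop]
  unfold pvC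
  congr 3
  omega

-- ===== VERDICT (by name: the statement is the Claim_ definition above) =====
theorem two_pointer_optimzed_spec : Claim_equal_two_pointer_optimzed := by
  intro data k _
  unfold Spec_two_pointer_optimzed two_pointer_optimzed two_pointer_optimzed_alt
  have hfold : ∀ xs : List Int,
      List.foldl (fun l x => l ++ [PySem.List.pyGetD l (-1) 0 + x]) [0] xs = pvPsums xs :=
    fun _ => rfl
  by_cases h : k < (data.length : Int)
  · simp only [h, not_true_eq_false, if_false]
    by_cases hk : 1 ≤ k
    · -- k ≥ 1: both sides are the max of pvC over the split points k-1, …, 1, seeded with pvC kn kn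
      set kn := k.toNat with hkn
      have hk' : (kn : Int) = k := Int.toNat_of_nonneg (by omega)
      have hknn : kn < data.length := by omega
      have hkn1 : 1 ≤ kn := by omega
      rw [← hk']
      have hslice : PySem.List.slice data none (some (kn : Int)) = data.take kn :=
        PySem.List.slice_to data (b := (kn : Int)) (by omega)
      have hsuf : PySem.List.slice data (some ((data.length : Int) - ((kn : Int) - 1))) none
          = data.drop (data.length - kn + 1) := by
        rw [PySem.List.slice_from data (a := (data.length : Int) - ((kn : Int) - 1)) (by omega)]
        congr 1
        omega
      have hr1 : (kn : Int) - 1 = ((kn - 1 : Nat) : Int) := by omega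
      rw [hslice, hsuf, hfold, hfold, pvPsums_last, hr1]
      have hs0 : (data.take kn).sum = pvC data kn kn := by
        unfold pvC
        simp
      rw [hs0]
      have HL := pvLoopA data kn hknn (kn - 1) (pvC data kn kn) (by omega)
      rw [Nat.sub_add_cancel hkn1] at HL
      have hinit : ((kn - 1 : Nat) : Int) - (kn : Int) = -1 := by omega
      rw [hinit] at HL
      rw [HL]
      apply (PySem.List.foldl_congr_mem _ _ _ _ _).symm
      intro acc j hjmem
      rw [PySem.List.mem_pyRange_neg_one] at hjmem
      rw [pvB_elem data kn hkn1 hknn j hjmem.1 (by omega)]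
    · -- k ≤ 0: the loop is empty on both sides; A returns sum(data[:k]) = pre[-1]
      rw [PySem.List.pyRange_neg_one_eq_nil (by omega : k - 1 ≤ 0),
        List.foldl_nil, List.foldl_nil, hfold, pvPsums_last]
  · simp [h]
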